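-- pv_equiv track=rewrite | github.com/RenanOliveira43/MC102 | lab05.py | buscar_bidirecional
-- ===== SOURCE A (Python) =====
-- def buscar_bidirecional(lista, g):
--     count = 0
--     for i in range(len(lista)):
--         if lista[i:i+len(g)] == list(g):
--             count += 1
--         if lista[i:i+len(g)] == list(g[::-1]):
--             count += 1
--     return count
-- ===== SOURCE B (Python) =====
-- def buscar_bidirecional(lista, g):
--     n = len(lista)
--     m = len(g)
--     if m == 0:
--         return 2 * n
--     starts = {}
--     for i, v in enumerate(lista):
--         starts.setdefault(v, []).append(i)
--     gl = list(g)
--     rev = gl[::-1]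
--     count = 0
--     for i in starts.get(gl[0], []):
--         if lista[i:i + m] == gl:
--             count += 1
--     for i in starts.get(rev[0], []):
--         if lista[i:i + m] == rev:
--             count += 1
--     return count
-- ===== Notes on version B (the rewrite author's own statement) =====
-- stated objective: faster
-- what changed: B builds a value-to-positions index of lista in one pass and verifies only the candidate positions where the pattern's (or reversed pattern's) first element occurs, with a closed form 2*len(lista) for the empty pattern, instead of A's full scan that rebuilds list(g) and list(g[::-1]) and compares two slices at every position.
import Mathlib
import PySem

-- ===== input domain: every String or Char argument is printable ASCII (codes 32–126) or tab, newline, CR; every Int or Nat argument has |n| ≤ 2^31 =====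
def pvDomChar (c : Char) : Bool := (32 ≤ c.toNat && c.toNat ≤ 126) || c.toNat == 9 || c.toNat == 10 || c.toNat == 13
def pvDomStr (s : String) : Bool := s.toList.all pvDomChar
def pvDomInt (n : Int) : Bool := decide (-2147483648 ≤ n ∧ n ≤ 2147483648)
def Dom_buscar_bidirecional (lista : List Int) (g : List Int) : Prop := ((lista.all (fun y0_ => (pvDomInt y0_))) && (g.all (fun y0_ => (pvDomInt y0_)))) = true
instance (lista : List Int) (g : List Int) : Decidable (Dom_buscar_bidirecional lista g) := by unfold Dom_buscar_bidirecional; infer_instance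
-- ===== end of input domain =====

-- B replaces A's full scan (two slice comparisons at every position) by a value→positions
-- index built in one pass, checking only candidate positions where the first pattern element
-- occurs, and a closed form 2*n for the empty pattern.

-- ===== PORT A =====
-- for i in range(len(lista)): two independent 'if slice == pattern: count += 1' checks;
-- list(g) is g itself, list(g[::-1]) is g.reverse (PySem.List.slice?_none_none_neg_one).
def buscar_bidirecional (lista : List Int) (g : List Int) : Int :=
  (PySem.List.pyRange 0 (lista.length : Int) 1).foldl
    (fun count i =>
      let count := if PySem.List.slice lista (some i) (some (i + (g.length : Int))) == g then count + 1 else count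
      if PySem.List.slice lista (some i) (some (i + (g.length : Int))) == g.reverse then count + 1 else count)
    0

-- ===== PORT B =====
-- for i, v in enumerate(lista): starts.setdefault(v, []).append(i)
def bbIndex (lista : List Int) : PySem.Dict Int (List Int) :=
  (PySem.List.enumerate lista 0).foldl (fun d q => d.modify q.2 [] (fun l => l ++ [q.1])) PySem.Dict.empty

-- for i in starts.get(p[0], []): if lista[i:i+m] == p: count += 1
def bbCount (lista : List Int) (m : Int) (idx : PySem.Dict Int (List Int)) (p : List Int) : Int :=
  (idx.getD (PySem.List.pyGetD p 0 0) []).foldl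
    (fun count i => if PySem.List.slice lista (some i) (some (i + m)) == p then count + 1 else count) 0

def buscar_bidirecional_alt (lista : List Int) (g : List Int) : Int :=
  let n : Int := lista.length
  let m : Int := g.length
  if m == 0 then 2 * n
  else
    let idx := bbIndex lista
    bbCount lista m idx g + bbCount lista m idx g.reverse

-- ===== PRECONDITION & SPEC =====
def Spec_buscar_bidirecional (lista : List Int) (g : List Int) (out : Int) : Prop := out = buscar_bidirecional_alt lista g
instance (lista : List Int) (g : List Int) (out : Int) : Decidable (Spec_buscar_bidirecional lista g out) := by unfold Spec_buscar_bidirecional; infer_instance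

-- ===== CLAIM (what is proved, stated in full; the proofs are below) =====
def Claim_equal_buscar_bidirecional : Prop := ∀ (lista : List Int) (g : List Int), Dom_buscar_bidirecional lista g → Spec_buscar_bidirecional lista g (buscar_bidirecional lista g)

-- ===== LEMMAS AND PROOFS =====

-- the index maps a value v to the (ascending) positions of v in lista
theorem bbIndex_getD (lista : List Int) (v : Int) :
    (bbIndex lista).getD v []
      = ((PySem.List.enumerate lista 0).filter (fun q => q.2 == v)).map (fun q => q.1) := by
  have h : bbIndex lista
      = ((PySem.List.enumerate lista 0).map Prod.swap).foldl
          (fun d p => d.modify p.1 [] (fun l => l ++ [p.2])) PySem.Dict.empty := by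
    rw [List.foldl_map]; rfl
  rw [h, PySem.Dict.getD_foldl_modify_append, PySem.Dict.getD_empty, List.filter_map,
    List.map_map]
  simp [Function.comp_def]

-- elements of enumerate are (s+k, xs[k])
theorem mem_enumerate_spec {α : Type} {xs : List α} {s : Int} {q : Int × α}
    (hq : q ∈ PySem.List.enumerate xs s) :
    ∃ (k : Nat) (h : k < xs.length), q.1 = s + (k : Int) ∧ q.2 = xs[k] := by
  induction xs generalizing s with
  | nil => simp [PySem.List.enumerate_nil] at hq
  | cons x t ih =>
    rw [PySem.List.enumerate_cons] at hq
    rcases List.mem_cons.mp hq with h | h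
    · exact ⟨0, by simp, by simp [h]⟩
    · obtain ⟨k, hk, h1, h2⟩ := ih h
      exact ⟨k + 1, by simpa using hk, by push_cast [h1]; ring, by simpa using h2⟩

-- if the slice at position q.1 equals the (nonempty) pattern p, the value there is p[0]
theorem slice_at_enum (lista : List Int) (p : List Int) (hp : p ≠ []) {q : Int × Int}
    (hq : q ∈ PySem.List.enumerate lista 0)
    (hs : PySem.List.slice lista (some q.1) (some (q.1 + (p.length : Int))) = p) :
    q.2 = PySem.List.pyGetD p 0 0 := by
  obtain ⟨k, hk, h1, h2⟩ := mem_enumerate_spec hq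
  obtain ⟨p0, pr, rfl⟩ := List.exists_cons_of_ne_nil hp
  rw [h1, zero_add, PySem.List.slice_natCast_add lista k (p0 :: pr).length] at hs
  rw [List.drop_eq_getElem_cons hk] at hs
  simp only [List.length_cons, List.take_succ_cons, List.cons.injEq] at hs
  rw [h2, PySem.List.pyGetD_zero_cons]
  exact hs.1

-- B's candidate count for a nonempty pattern equals the count over all positions
theorem bbCount_eq (lista : List Int) (p : List Int) (hp : p ≠ []) :
    bbCount lista (p.length : Int) (bbIndex lista) p
      = ((PySem.List.pyRange 0 (lista.length : Int) 1).countP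
          (fun i => PySem.List.slice lista (some i) (some (i + (p.length : Int))) == p) : Int) := by
  unfold bbCount
  rw [bbIndex_getD, List.foldl_map, PySem.List.foldl_count_if, zero_add]
  congr 1
  rw [List.countP_filter]
  have h1 : (PySem.List.enumerate lista 0).countP
      (fun q => (PySem.List.slice lista (some q.1) (some (q.1 + (p.length : Int))) == p)
                  && (q.2 == PySem.List.pyGetD p 0 0))
      = (PySem.List.enumerate lista 0).countP
          (fun q => PySem.List.slice lista (some q.1) (some (q.1 + (p.length : Int))) == p) := by
    apply List.countP_congr
    intro q hq
    simp only [Bool.and_eq_true, beq_iff_eq, and_iff_left_iff_imp]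
    exact fun hs => slice_at_enum lista p hp hq hs
  have h2 : PySem.List.pyRange 0 (lista.length : Int) 1
      = (PySem.List.enumerate lista 0).map (fun q => q.1) := by
    rw [PySem.List.map_fst_enumerate lista 0, zero_add]
  rw [h1, h2, List.countP_map]
  rfl

-- A as a sum of two counts
theorem portA_eq (lista : List Int) (g : List Int) :
    buscar_bidirecional lista g
      = ((PySem.List.pyRange 0 (lista.length : Int) 1).countP
          (fun i => PySem.List.slice lista (some i) (some (i + (g.length : Int))) == g) : Int)
        + ((PySem.List.pyRange 0 (lista.length : Int) 1).countP
            (fun i => PySem.List.slice lista (some i) (some (i + (g.length : Int))) == g.reverse) : Int) := by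
  unfold buscar_bidirecional
  have hbody : (fun (count : Int) (i : Int) =>
      let count := if PySem.List.slice lista (some i) (some (i + (g.length : Int))) == g then count + 1 else count
      if PySem.List.slice lista (some i) (some (i + (g.length : Int))) == g.reverse then count + 1 else count)
      = fun (count : Int) (i : Int) => count +
          ((if PySem.List.slice lista (some i) (some (i + (g.length : Int))) == g then (1:Int) else 0)
            + (if PySem.List.slice lista (some i) (some (i + (g.length : Int))) == g.reverse then (1:Int) else 0)) := by
    funext c i
    by_cases h1 : PySem.List.slice lista (some i) (some (i + (g.length : Int))) == g <;>
      by_cases h2 : PySem.List.slice lista (some i) (some (i + (g.length : Int))) == g.reverse <;>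
      (simp [h1, h2]; try ring)
  rw [hbody, PySem.List.foldl_add, zero_add, PySem.List.sum_map_add_int,
    PySem.List.sum_map_ite_one_zero, PySem.List.sum_map_ite_one_zero]

-- ===== VERDICT (by name: the statement is the Claim_ definition above) =====
theorem buscar_bidirecional_spec : Claim_equal_buscar_bidirecional := by
  intro lista g _
  unfold Spec_buscar_bidirecional buscar_bidirecional_alt
  by_cases hg : g = []
  · -- empty pattern: every position counts twice, A's loop sums to 2*n
    subst hg
    simp only [List.length_nil, Nat.cast_zero, beq_self_eq_true, if_pos]
    rw [portA_eq]
    simp only [List.length_nil, List.reverse_nil, Nat.cast_zero, add_zero]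
    have hall : ∀ i ∈ PySem.List.pyRange 0 (lista.length : Int) 1,
        ((PySem.List.slice lista (some i) (some i) == ([] : List Int)) = true ↔ (true : Bool) = true) := by
      intro i hi
      have h0 : (0:Int) ≤ i := (PySem.List.mem_pyRange_one.mp hi).1
      simp [PySem.List.slice_toNat lista h0 h0]
    rw [List.countP_congr hall, List.countP_true, PySem.List.length_pyRange_one]
    simp
    ring
  · -- nonempty pattern: only candidate positions can match
    have hm : ((g.length : Int) == 0) = false := by
      simp [List.length_eq_zero_iff, hg]
    simp only [hm, Bool.false_eq_true, if_false]
    rw [portA_eq, bbCount_eq lista g hg]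
    have hrev : (g.length : Int) = (g.reverse.length : Int) := by simp
    rw [hrev, bbCount_eq lista g.reverse (by simp [hg])]
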